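-- pv_equiv track=rewrite | github.com/dp-web4/HRM | sage/experiments/cross_family_probe.py | score_markers
-- ===== SOURCE A (Python) =====
-- from typing import Dict, List, Any, Optional
--
-- def score_markers(text: str, markers: Dict[str, List[str]]) -> Dict[str, int]:
--     """Count marker hits per category in a response."""
--     text_lower = text.lower()
--     scores = {}
--     for category, terms in markers.items():
--         if not terms:
--             scores[category] = 1 if text.strip() else 0
--         else:
--             scores[category] = sum(1 for t in terms if t.lower() in text_lower)
--     return scores
-- ===== SOURCE B (Python) =====
-- def score_markers(text, markers):
--     """Count marker hits per category in a response.
--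
--     Different algorithm: instead of scanning the text once per term, build a
--     hash set of every substring of the lowered text whose length is one of the
--     (lowered) term lengths, in one sweep per needed length; each term is then
--     scored by a single set lookup. Correct because 't.lower() in text_lower'
--     holds iff some substring of text_lower of length len(t.lower()) equals
--     t.lower().
--     """
--     text_lower = text.lower()
--     lengths = {len(t.lower()) for _, terms in markers.items() for t in terms}
--     n = len(text_lower)
--     subs = set()
--     for L in lengths:
--         if L <= n:
--             for i in range(n - L + 1):
--                 subs.add(text_lower[i:i + L])
--     nonempty = 1 if text.strip() else 0
--     return {cat: (sum(1 for t in terms if t.lower() in subs) if terms else nonempty)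
--             for cat, terms in markers.items()}
-- ===== Notes on version B (the rewrite author's own statement) =====
-- stated objective: faster
-- what changed: B builds a hash set of all substrings of the lowered text whose lengths match some term (one sweep of the text per needed length) and scores each term by a single set lookup, instead of A's per-term substring scan of the whole text.
import Mathlib
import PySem

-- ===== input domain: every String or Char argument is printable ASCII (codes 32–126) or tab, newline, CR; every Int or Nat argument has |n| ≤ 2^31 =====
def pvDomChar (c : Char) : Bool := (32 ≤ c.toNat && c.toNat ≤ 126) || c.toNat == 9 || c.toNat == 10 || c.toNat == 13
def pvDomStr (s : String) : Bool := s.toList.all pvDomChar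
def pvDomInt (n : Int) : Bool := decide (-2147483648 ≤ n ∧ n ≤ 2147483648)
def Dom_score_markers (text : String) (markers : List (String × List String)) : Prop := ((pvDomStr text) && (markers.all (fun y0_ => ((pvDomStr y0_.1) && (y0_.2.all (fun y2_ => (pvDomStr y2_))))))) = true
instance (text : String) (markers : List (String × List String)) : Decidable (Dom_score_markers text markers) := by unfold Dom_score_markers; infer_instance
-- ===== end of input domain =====

-- B indexes every substring of the text whose length matches some term in a hash set (one sweep per
-- needed length) and scores each term by a set lookup; A scans the text once per term (measured faster in a timing run).

-- ===== PORT A =====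
def score_markers (text : String) (markers : List (String × List String)) : List (String × Int) :=
  let text_lower := PySem.Str.lower text
  (markers.foldl (fun (scores : PySem.Dict String Int) cm =>
      if cm.2 = [] then
        scores.insert cm.1 (if PySem.Str.strip text ≠ "" then 1 else 0)
      else
        scores.insert cm.1
          (cm.2.foldl (fun acc t =>
            acc + (if PySem.Str.isIn (PySem.Str.lower t) text_lower then 1 else 0)) 0))
    PySem.Dict.empty).items

-- ===== PORT B =====
-- body of B's substring-index loop: all substrings of tl of length L (if L fits), added to s
def subStep (tl : String) (n : Int) (s : PySem.Set String) (L : Int) : PySem.Set String :=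
  if L ≤ n then
    (PySem.List.pyRange 0 (n - L + 1) 1).foldl
      (fun s i => PySem.Set.add s (PySem.Str.slice tl (some i) (some (i + L)))) s
  else s

def subsOf (tl : String) (n : Int) (lens : List Int) : PySem.Set String :=
  lens.foldl (subStep tl n) PySem.Set.empty

def score_markers_alt (text : String) (markers : List (String × List String)) : List (String × Int) :=
  let text_lower := PySem.Str.lower text
  let lengths : PySem.Set Int :=
    PySem.Set.ofList ((markers.flatMap (fun cm => cm.2)).map
      (fun t => ((PySem.Str.len (PySem.Str.lower t) : Int))))
  let n : Int := (PySem.Str.len text_lower : Int)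
  let subs : PySem.Set String := subsOf text_lower n lengths
  let nonempty : Int := if PySem.Str.strip text ≠ "" then 1 else 0
  (markers.foldl (fun (scores : PySem.Dict String Int) cm =>
      scores.insert cm.1
        (if cm.2 ≠ [] then
          cm.2.foldl (fun acc t =>
            acc + (if PySem.Set.contains subs (PySem.Str.lower t) then 1 else 0)) 0
        else nonempty))
    PySem.Dict.empty).items

-- ===== PRECONDITION & SPEC =====
def Spec_score_markers (text : String) (markers : List (String × List String)) (out : List (String × Int)) : Prop := out = score_markers_alt text markers
instance (text : String) (markers : List (String × List String)) (out : List (String × Int)) : Decidable (Spec_score_markers text markers out) := by unfold Spec_score_markers; infer_instance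

-- ===== CLAIM (what is proved, stated in full; the proofs are below) =====
def Claim_equal_score_markers : Prop := ∀ (text : String) (markers : List (String × List String)), Dom_score_markers text markers → Spec_score_markers text markers (score_markers text markers)

-- ===== LEMMAS AND PROOFS =====

-- membership in the substring index: u is in subsOf tl n lens iff some admissible length L of lens
-- yields u as a slice of tl
lemma mem_subsOf (tl : String) (n : Int) (lens : List Int) (u : String) :
    u ∈ subsOf tl n lens ↔
      ∃ L ∈ lens, L ≤ n ∧ ∃ i ∈ PySem.List.pyRange 0 (n - L + 1) 1,
        u = PySem.Str.slice tl (some i) (some (i + L)) := by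
  unfold subsOf
  have key : ∀ (ls : List Int) (s : PySem.Set String),
      u ∈ ls.foldl (subStep tl n) s ↔
        u ∈ s ∨ ∃ L ∈ ls, L ≤ n ∧ ∃ i ∈ PySem.List.pyRange 0 (n - L + 1) 1,
          u = PySem.Str.slice tl (some i) (some (i + L)) := by
    intro ls
    induction ls with
    | nil => simp
    | cons L ls ih =>
      intro s
      simp only [List.foldl_cons, ih]
      unfold subStep
      split
      · rename_i hLn
        rw [PySem.Set.mem_foldl_add]
        constructor
        · rintro (((h | ⟨i, hi, hu⟩) | ⟨L', hL', h⟩))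
          · exact Or.inl h
          · exact Or.inr ⟨L, List.mem_cons_self .., hLn, i, hi, hu⟩
          · exact Or.inr ⟨L', List.mem_cons_of_mem _ hL', h⟩
        · rintro (h | ⟨L', hL', hLn', i, hi, hu⟩)
          · exact Or.inl (Or.inl h)
          · rcases List.mem_cons.mp hL' with rfl | hL'
            · exact Or.inl (Or.inr ⟨i, hi, hu⟩)
            · exact Or.inr ⟨L', hL', hLn', i, hi, hu⟩
      · rename_i hLn
        constructor
        · rintro (h | ⟨L', hL', h⟩)
          · exact Or.inl h
          · exact Or.inr ⟨L', List.mem_cons_of_mem _ hL', h⟩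
        · rintro (h | ⟨L', hL', hLn', i, hi, hu⟩)
          · exact Or.inl h
          · rcases List.mem_cons.mp hL' with rfl | hL'
            · exact absurd hLn' hLn
            · exact Or.inr ⟨L', hL', hLn', i, hi, hu⟩
  rw [key]
  simp [PySem.Set.empty]

-- every element of the index is a contiguous piece of tl
lemma infix_of_mem_subsOf (tl : String) (lens : List Int) (u : String)
    (hpos : ∀ L ∈ lens, 0 ≤ L)
    (h : u ∈ subsOf tl (PySem.Str.len tl : Int) lens) : u.toList <:+: tl.toList := by
  rcases (mem_subsOf ..).mp h with ⟨L, hL, _, i, hi, rfl⟩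
  have h0i : (0:Int) ≤ i := ((PySem.List.mem_pyRange_one).mp hi).1
  have h0L : (0:Int) ≤ L := hpos L hL
  have : (PySem.Str.slice tl (some i) (some (i + L))).toList
      = (tl.toList.drop i.toNat).take ((i + L).toNat - i.toNat) := by
    rw [PySem.Str.toList_slice, PySem.Chars.slice_eq_listSlice,
      PySem.List.slice_toNat _ h0i (show (0:Int) ≤ i + L by omega)]
  rw [this]
  exact ((tl.toList.drop i.toNat).take_prefix _).isInfix.trans
    (tl.toList.drop_suffix i.toNat).isInfix

-- completeness: a substring of tl whose length is indexed is in the index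
lemma mem_subsOf_of_infix (tl : String) (lens : List Int) (u : String)
    (hlen : ((u.toList.length : Int)) ∈ lens)
    (h : u.toList <:+: tl.toList) : u ∈ subsOf tl (PySem.Str.len tl : Int) lens := by
  have hn : (PySem.Str.len tl : Int) = (tl.toList.length : Int) := by simp
  by_cases hu : u.toList = []
  · have hu0 : u.toList.length = 0 := by simp [hu]
    apply (mem_subsOf ..).mpr
    refine ⟨(u.toList.length : Int), hlen, by rw [hn]; omega, ((0 : Nat) : Int), ?_, ?_⟩
    · rw [PySem.List.mem_pyRange_one, hn]
      omega
    · apply String.toList_inj.mp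
      rw [PySem.Str.toList_slice, PySem.Chars.slice_eq_listSlice,
        PySem.List.slice_natCast_add]
      simp [hu]
  · have hupos : 0 < u.toList.length := List.length_pos_of_ne_nil hu
    have hin : PySem.Chars.isIn u.toList tl.toList = true := (PySem.Chars.isIn_iff_infix ..).mpr h
    rcases (PySem.Chars.exists_prefix_drop_iff_isIn ..).mpr hin with ⟨j, hpre⟩
    have htake := List.prefix_iff_eq_take.mp hpre
    have hlenle : u.toList.length ≤ tl.toList.length - j := by
      simpa using hpre.length_le
    have hjle : j + u.toList.length ≤ tl.toList.length := by omega
    apply (mem_subsOf ..).mpr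
    refine ⟨(u.toList.length : Int), hlen, by rw [hn]; omega, ((j : Nat) : Int), ?_, ?_⟩
    · rw [PySem.List.mem_pyRange_one, hn]
      omega
    · apply String.toList_inj.mp
      rw [PySem.Str.toList_slice, PySem.Chars.slice_eq_listSlice,
        PySem.List.slice_natCast_add]
      exact htake

-- every length recorded by B is a (nonnegative) Nat cast
lemma lengths_nonneg (markers : List (String × List String)) :
    ∀ L ∈ PySem.Set.ofList ((markers.flatMap (fun cm => cm.2)).map
      (fun t => ((PySem.Str.len (PySem.Str.lower t) : Int)))), 0 ≤ L := by
  intro L hL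
  rw [PySem.Set.mem_ofList] at hL
  rcases List.mem_map.mp hL with ⟨t, _, rfl⟩
  exact Int.natCast_nonneg _

-- the index lookup agrees with Python's substring test for every term of markers
lemma contains_subs_eq_isIn (text : String) (markers : List (String × List String))
    (t : String) (hm : t ∈ markers.flatMap (fun cm => cm.2)) :
    PySem.Set.contains
      (subsOf (PySem.Str.lower text) (PySem.Str.len (PySem.Str.lower text) : Int)
        (PySem.Set.ofList ((markers.flatMap (fun cm => cm.2)).map
          (fun t => ((PySem.Str.len (PySem.Str.lower t) : Int))))))
      (PySem.Str.lower t)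
      = PySem.Str.isIn (PySem.Str.lower t) (PySem.Str.lower text) := by
  have hlen : (((PySem.Str.lower t).toList.length : Int)) ∈
      PySem.Set.ofList ((markers.flatMap (fun cm => cm.2)).map
        (fun t => ((PySem.Str.len (PySem.Str.lower t) : Int)))) := by
    rw [PySem.Set.mem_ofList]
    apply List.mem_map.mpr
    exact ⟨t, hm, by simp⟩
  cases hIn : PySem.Str.isIn (PySem.Str.lower t) (PySem.Str.lower text) with
  | true =>
    have hinf := (PySem.Str.isIn_iff_infix ..).mp hIn
    exact (PySem.Set.contains_iff ..).mpr (mem_subsOf_of_infix _ _ _ hlen hinf)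
  | false =>
    rw [Bool.eq_false_iff]
    intro hC
    have hmem := (PySem.Set.contains_iff ..).mp hC
    have hinf := infix_of_mem_subsOf _ _ _ (lengths_nonneg markers) hmem
    have htrue : PySem.Str.isIn (PySem.Str.lower t) (PySem.Str.lower text) = true :=
      (PySem.Str.isIn_iff_infix ..).mpr hinf
    rw [hIn] at htrue
    exact Bool.false_ne_true htrue

-- ===== VERDICT (by name: the statement is the Claim_ definition above) =====
theorem score_markers_spec : Claim_equal_score_markers := by
  intro text markers _
  unfold Spec_score_markers
  simp only [score_markers, score_markers_alt]
  congr 1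
  apply PySem.List.foldl_congr_mem
  intro scores cm hcm
  by_cases hnil : cm.2 = []
  · simp [hnil]
  · simp only [if_neg hnil, if_pos hnil]
    congr 1
    apply PySem.List.foldl_congr_mem
    intro acc t ht
    rw [contains_subs_eq_isIn text markers t (List.mem_flatMap.mpr ⟨cm, hcm, ht⟩)]
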